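-- pv_equiv track=rewrite | github.com/SiryZex/TetrisAI | 219120756_TetrisAI/heuristic.py | _holes_in_board
-- ===== SOURCE A (Python) =====
-- def _is_tetromino(cell):
-- 	return cell != 0
--
-- def _is_empty(cell):
-- 	return cell == 0
--
-- def _holes_in_board(board):
-- 	holes = []
-- 	block_in_col = False
-- 	for x in range(len(board[0])):
-- 		for y in range(len(board)):
-- 			if block_in_col and _is_empty(board[y][x]):
-- 				holes.append((x,y))
-- 			elif _is_tetromino(board[y][x]):
-- 				block_in_col = True
-- 		block_in_col = False
-- 	return holes
-- ===== SOURCE B (Python) =====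
-- def _holes_in_board(board):
-- 	w = len(board[0])
-- 	state = [(False, []) for _ in range(w)]
-- 	for y, row in enumerate(board):
-- 		state = [(blk or c != 0, hs + [(x, y)] if blk and c == 0 else hs)
-- 		         for x, ((blk, hs), c) in enumerate(zip(state, row))]
-- 	return [h for _, hs in state for h in hs]
-- ===== Notes on version B (the rewrite author's own statement) =====
-- stated objective: alternative
-- what changed: Transposes the traversal: instead of A's column-major scans each carrying a boolean flag, B makes a single row-major pass that rebuilds a per-column (blocked, holes) state list by zipping it with each row, then flattens the per-column hole lists; Pre_ excludes only the empty board and boards with a row shorter than row 0, on which A raises IndexError.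
import Mathlib
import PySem

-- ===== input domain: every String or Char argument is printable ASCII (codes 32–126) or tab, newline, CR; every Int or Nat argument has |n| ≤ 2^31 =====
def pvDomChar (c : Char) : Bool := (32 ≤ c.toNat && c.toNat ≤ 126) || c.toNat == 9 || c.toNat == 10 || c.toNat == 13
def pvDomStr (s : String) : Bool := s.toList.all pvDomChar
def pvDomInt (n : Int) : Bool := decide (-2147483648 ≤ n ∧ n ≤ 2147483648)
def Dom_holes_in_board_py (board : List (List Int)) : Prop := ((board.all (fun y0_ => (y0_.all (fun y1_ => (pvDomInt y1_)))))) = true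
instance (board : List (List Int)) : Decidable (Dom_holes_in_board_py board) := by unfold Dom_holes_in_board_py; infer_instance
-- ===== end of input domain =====

-- B transposes the traversal: a single row-major pass rebuilding a per-column (blocked, holes)
-- state list zipped with each row, then a flatten — instead of A's column-major flagged scans
-- (objective: alternative, same asymptotic cost). Return-value equivalence only; neither mutates.


-- ===== PORT A =====
-- board[y][x]; total via getD defaults, exact on Pre_ (all accesses in range there).
def pvCell (board : List (List Int)) (x y : Int) : Int :=
  PySem.List.pyGetD (PySem.List.pyGetD board y []) x 0

-- A's inner-loop body: state = (holes, block_in_col).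
def pvStep (board : List (List Int)) (x : Int) : List (Int × Int) × Bool → Int → List (Int × Int) × Bool :=
  fun st y =>
    if st.2 && (pvCell board x y == 0) then (st.1 ++ [(x, y)], st.2)
    else if pvCell board x y != 0 then (st.1, true)
    else st

def holes_in_board_py (board : List (List Int)) : List (Int × Int) :=
  (PySem.List.pyRange 0 (board.headD []).length 1).foldl
    (fun holes x =>
      ((PySem.List.pyRange 0 board.length 1).foldl (pvStep board x) (holes, false)).1)
    []

-- ===== PORT B =====
-- state = [(blk or c != 0, hs + [(x,y)] if blk and c == 0 else hs)
--          for x, ((blk, hs), c) in enumerate(zip(state, row))]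
def pvRowStep (y : Int) (state : List (Bool × List (Int × Int))) (row : List Int) :
    List (Bool × List (Int × Int)) :=
  (PySem.List.enumerate (state.zip row)).map
    (fun q => (q.2.1.1 || q.2.2 != 0,
               if q.2.1.1 && q.2.2 == 0 then q.2.1.2 ++ [(q.1, y)] else q.2.1.2))

def holes_in_board_py_alt (board : List (List Int)) : List (Int × Int) :=
  let w := (board.headD []).length
  let init : List (Bool × List (Int × Int)) :=
    (PySem.List.pyRange 0 w 1).map (fun _ => (false, []))
  let final := (PySem.List.enumerate board).foldl
    (fun state p => pvRowStep p.1 state p.2) init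
  final.flatMap (fun s => s.2)

-- ===== PRECONDITION & SPEC =====
-- Pre_ excludes exactly the inputs where Python A raises IndexError: the empty board
-- (board[0]) and ragged boards with some row shorter than row 0 (board[y][x]).
def Pre_holes_in_board_py (board : List (List Int)) : Prop :=
  board ≠ [] ∧ ∀ row ∈ board, (board.headD []).length ≤ row.length
instance (board : List (List Int)) : Decidable (Pre_holes_in_board_py board) := by unfold Pre_holes_in_board_py; infer_instance
def pvWitness_holes_in_board_py : List (List Int) := [[0, 1], [1, 0]]
def Spec_holes_in_board_py (board : List (List Int)) (out : List (Int × Int)) : Prop := out = holes_in_board_py_alt board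
instance (board : List (List Int)) (out : List (Int × Int)) : Decidable (Spec_holes_in_board_py board out) := by unfold Spec_holes_in_board_py; infer_instance

-- ===== CLAIM (what is proved, stated in full; the proofs are below) =====
def Claim_equal_holes_in_board_py : Prop := ∀ (board : List (List Int)), Dom_holes_in_board_py board → Pre_holes_in_board_py board → Spec_holes_in_board_py board (holes_in_board_py board)

-- ===== LEMMAS AND PROOFS =====

-- Canonical per-column step, in B's (blocked, holes) orientation.
def pvCStep (x y c : Int) (s : Bool × List (Int × Int)) : Bool × List (Int × Int) :=
  (s.1 || c != 0, if s.1 && c == 0 then s.2 ++ [(x, y)] else s.2)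

-- A's step is the canonical step with the pair swapped.
theorem pvStep_eq (board : List (List Int)) (x : Int) (st : List (Int × Int) × Bool) (y : Int) :
    pvStep board x st y
      = ((pvCStep x y (pvCell board x y) (st.2, st.1)).2,
         (pvCStep x y (pvCell board x y) (st.2, st.1)).1) := by
  rcases st with ⟨hs, b⟩
  by_cases hc : pvCell board x y = 0 <;> cases b <;> simp [pvStep, pvCStep, hc]

-- A's inner fold is the canonical column fold, swapped.
theorem pvAfold (board : List (List Int)) (x : Int) :
    ∀ (ys : List Int) (hs : List (Int × Int)) (b : Bool),
    ys.foldl (pvStep board x) (hs, b)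
      = ((ys.foldl (fun s y => pvCStep x y (pvCell board x y) s) (b, hs)).2,
         (ys.foldl (fun s y => pvCStep x y (pvCell board x y) s) (b, hs)).1) := by
  intro ys
  induction ys with
  | nil => intro hs b; rfl
  | cons y ys ih =>
    intro hs b
    rw [List.foldl_cons, List.foldl_cons, pvStep_eq]
    exact ih _ _

-- The canonical column fold factors its holes accumulator out.
theorem pvFactor (x : Int) (g : Int → Int) :
    ∀ (ys : List Int) (b : Bool) (hs : List (Int × Int)),
    ys.foldl (fun s y => pvCStep x y (g y) s) (b, hs)
      = ((ys.foldl (fun s y => pvCStep x y (g y) s) (b, [])).1,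
         hs ++ (ys.foldl (fun s y => pvCStep x y (g y) s) (b, [])).2) := by
  intro ys
  induction ys with
  | nil => intro b hs; simp
  | cons y ys ih =>
    intro b hs
    rw [List.foldl_cons, List.foldl_cons]
    rw [ih (pvCStep x y (g y) (b, hs)).1 (pvCStep x y (g y) (b, hs)).2,
        ih (pvCStep x y (g y) (b, [])).1 (pvCStep x y (g y) (b, [])).2]
    by_cases hc : g y = 0 <;> cases b <;> simp [pvCStep, hc]

-- One B row step on a map-over-range state is a pointwise column step (row long enough).
theorem pvRowStep_map (w : Nat) (f : Nat → Bool × List (Int × Int)) (y : Int) (row : List Int)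
    (hrow : w ≤ row.length) :
    pvRowStep y ((List.range w).map f) row
      = (List.range w).map (fun (k : Nat) => pvCStep (k : Int) y (row.getD k 0) (f k)) := by
  apply List.ext_getElem
  · simp [pvRowStep, PySem.List.length_enumerate]
    omega
  · intro k hk1 hk2
    have hkw : k < w := by simpa using hk2
    have hkr : k < row.length := by omega
    simp only [pvRowStep, List.getElem_map, PySem.List.getElem_enumerate, List.getElem_zip,
      List.getElem_range]
    rw [List.getD_eq_getElem row 0 hkr]
    simp [pvCStep]

-- B's row-major fold over enumerated rows equals the column-wise folds, pointwise.
theorem pvBinv (w : Nat) :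
    ∀ (rows : List (Int × List Int)) (f : Nat → Bool × List (Int × Int)),
    (∀ p ∈ rows, w ≤ p.2.length) →
    rows.foldl (fun state p => pvRowStep p.1 state p.2) ((List.range w).map f)
      = (List.range w).map
          (fun (k : Nat) => rows.foldl (fun s p => pvCStep (k : Int) p.1 (p.2.getD k 0) s) (f k)) := by
  intro rows
  induction rows with
  | nil => intro f _; rfl
  | cons p rows ih =>
    intro f hlen
    rw [List.foldl_cons, pvRowStep_map w f p.1 p.2 (hlen p (by simp))]
    rw [ih _ (fun q hq => hlen q (by simp [hq]))]
    rfl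

-- ===== VERDICT (by name: the statement is the Claim_ definition above) =====
theorem holes_in_board_py_spec : Claim_equal_holes_in_board_py := by
  intro board _ hpre
  unfold Spec_holes_in_board_py holes_in_board_py
  rcases hpre with ⟨-, hlen⟩
  have hB : holes_in_board_py_alt board
      = ((PySem.List.enumerate board 0).foldl (fun state p => pvRowStep p.1 state p.2)
          ((PySem.List.pyRange 0 ((board.headD []).length : Int) 1).map
            (fun _ => ((false : Bool), ([] : List (Int × Int)))))).flatMap
          (fun s => s.2) := rfl
  rw [hB]
  set w := (board.headD []).length with hw
  -- A side: each column loop appends its column's holes, so the outer fold is a flatMap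
  have hstep : (fun (holes : List (Int × Int)) (x : Int) =>
        ((PySem.List.pyRange 0 board.length 1).foldl (pvStep board x) (holes, false)).1)
      = (fun holes x => holes ++ ((PySem.List.pyRange 0 board.length 1).foldl
          (fun s y => pvCStep x y (pvCell board x y) s) (false, [])).2) := by
    funext holes x
    rw [pvAfold board x _ holes false,
        pvFactor x (fun y => pvCell board x y) _ false holes]
  rw [hstep, PySem.List.foldl_append_eq_flatMap, List.nil_append]
  -- B side: the invariant turns the row-major fold into per-column folds
  have hinit : (PySem.List.pyRange 0 (w : Int) 1).map
      (fun _ => ((false : Bool), ([] : List (Int × Int))))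
      = (List.range w).map (fun _ => ((false : Bool), ([] : List (Int × Int)))) := by
    apply List.ext_getElem <;> simp [PySem.List.length_pyRange_one]
  have hrows : ∀ p ∈ PySem.List.enumerate board 0, w ≤ p.2.length := by
    intro p hp
    rcases (PySem.List.mem_enumerate_iff _ _ _).1 hp with ⟨k, hk, rfl⟩
    exact hlen _ (by simp)
  rw [hinit, pvBinv w (PySem.List.enumerate board 0) _ hrows]
  -- flatten both sides as flatMaps over range w, and compare column by column
  rw [List.flatMap_map]
  have hrange : PySem.List.pyRange 0 (w : Int) 1 = (List.range w).map (fun k => Int.ofNat k) := by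
    apply List.ext_getElem
    · simp [PySem.List.length_pyRange_one]
    · intro k h1 h2
      simp [PySem.List.getElem_pyRange_one]
  rw [hrange, List.flatMap_map]
  refine List.flatMap_congr ?_
  intro k _
  rw [PySem.List.enumerate_eq_map_pyRange (d := []), List.foldl_map]
  congr 1
  congr 1
  funext s y
  simp [pvCell, PySem.List.pyGetD_natCast]
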